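-- pv_equiv track=rewrite | github.com/trieuhoangan/NMT | node.py | gen_level_list_from_adj_list
-- ===== SOURCE A (Python) =====
-- def gen_level_list_from_adj_list(adj_list):
--     level_list = []
--     current_level = [0]
--     next_level = []
--     if len(adj_list[current_level[0]][1])!=0:
--         for i in adj_list[current_level[0]][1]:
--             next_level.append(i)
--     level_list.append(current_level)
--     while len(next_level)!=0:
--         current_level = next_level
--         level_list.append(current_level)
--         next_level = []
--         for node_index in current_level:
--             if len(adj_list[node_index][1]) != 0:
--                 for index in adj_list[node_index][1]:
--                     next_level.append(index)
--     return level_list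
-- ===== SOURCE B (Python) =====
-- from collections import deque
--
-- def gen_level_list_from_adj_list(adj_list):
--     level_list = []
--     queue = deque([(0, 0)])
--     while queue:
--         node, depth = queue.popleft()
--         if depth == len(level_list):
--             level_list.append([])
--         level_list[depth].append(node)
--         for child in adj_list[node][1]:
--             queue.append((child, depth + 1))
--     return level_list
-- ===== Notes on version B (the rewrite author's own statement) =====
-- stated objective: alternative
-- what changed: Replaces A's level-synchronous nested loops over two swap buffers (current_level/next_level) with a single FIFO-queue BFS of (node, depth) pairs that files each popped node into a depth-indexed bucket; FIFO order preserves the exact within-level ordering.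
-- outside the precondition, e.g. on gen_level_list_from_adj_list([(0, [-1]), (7, [])]): A returns [[0], [-1]], B returns [[0], [-1]]; on gen_level_list_from_adj_list([(0, [5])]): A raises IndexError, B raises IndexError
import Mathlib
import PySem

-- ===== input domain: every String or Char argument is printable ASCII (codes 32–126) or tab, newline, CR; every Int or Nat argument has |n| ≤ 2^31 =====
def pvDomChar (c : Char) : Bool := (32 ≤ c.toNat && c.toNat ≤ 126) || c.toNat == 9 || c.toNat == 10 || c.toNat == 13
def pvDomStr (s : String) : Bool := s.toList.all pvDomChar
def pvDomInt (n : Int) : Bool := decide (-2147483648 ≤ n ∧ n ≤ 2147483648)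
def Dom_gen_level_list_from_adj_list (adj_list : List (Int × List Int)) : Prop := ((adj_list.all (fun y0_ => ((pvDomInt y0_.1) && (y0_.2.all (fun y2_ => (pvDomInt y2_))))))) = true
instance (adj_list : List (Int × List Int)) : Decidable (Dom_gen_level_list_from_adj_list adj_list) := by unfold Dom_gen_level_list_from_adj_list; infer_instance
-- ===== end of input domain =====

-- A builds BFS levels with nested per-level loops over two swap buffers; B replaces that with a single
-- FIFO queue of (node, depth) pairs filling depth-indexed buckets (objective: alternative, same cost).
-- Both Lean ports use a fuel counter only to make Python's possibly-diverging while-loop total.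


-- ===== PORT A =====
-- adj_list[i][1] via Python indexing (negative wraps, out of range raises IndexError → excluded by Pre_)
def pvChilds (adj : List (Int × List Int)) (i : Int) : List Int :=
  ((PySem.List.pyGet? adj i).getD (0, [])).2

-- the inner 'for node_index in current_level: if len(...)!=0: for index in ...: next_level.append(index)'
def pvA_next (adj : List (Int × List Int)) (cur : List Int) : List Int :=
  cur.foldl (fun acc nd =>
    if (pvChilds adj nd).length ≠ 0 then
      (pvChilds adj nd).foldl (fun a c => a ++ [c]) acc
    else acc) []

-- the 'while len(next_level)!=0' loop; fuel only makes the recursion total (never runs out under Pre_)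
def pvA_while (adj : List (Int × List Int)) : Nat → List (List Int) → List Int → List (List Int)
  | _, lvls, [] => lvls
  | 0, lvls, _ => lvls
  | f+1, lvls, next => pvA_while adj f (lvls ++ [next]) (pvA_next adj next)

def gen_level_list_from_adj_list (adj_list : List (Int × List Int)) : List (List Int) :=
  let current_level : List Int := [0]
  let next_level : List Int :=
    if (pvChilds adj_list 0).length ≠ 0 then
      (pvChilds adj_list 0).foldl (fun a c => a ++ [c]) []
    else []
  pvA_while adj_list adj_list.length ([] ++ [current_level]) next_level

-- ===== PORT B =====
-- fuel bound for B's queue loop (totality device only; Python B has no fuel; never runs out under Pre_)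
def pvMaxDeg (adj : List (Int × List Int)) : Nat :=
  (adj.map (fun p => p.2.length)).foldl max 0
def pvB_fuel (adj : List (Int × List Int)) : Nat :=
  (pvMaxDeg adj + 1) ^ (adj.length + 1)

-- one FIFO queue of (node, depth); depth is a Nat since in Python it starts at 0 and only grows
def pvB_loop (adj : List (Int × List Int)) : Nat → List (Int × Nat) → List (List Int) → List (List Int)
  | _, [], lvls => lvls
  | 0, _, lvls => lvls
  | f+1, (node, depth) :: q, lvls =>
      let lvls1 := if depth = lvls.length then lvls ++ [[]] else lvls
      let lvls2 := lvls1.modify depth (fun bucket => bucket ++ [node])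
      pvB_loop adj f (q ++ (pvChilds adj node).map (fun c => (c, depth + 1))) lvls2

def gen_level_list_from_adj_list_alt (adj_list : List (Int × List Int)) : List (List Int) :=
  pvB_loop adj_list (pvB_fuel adj_list) [(0, 0)] []

-- ===== PRECONDITION & SPEC =====
-- Pre_ requires a nonempty list and that either node 0 is childless (then the BFS stops immediately)
-- or every edge i -> c satisfies i < c < len: outside this, Python A either raises IndexError (a child
-- used as an out-of-range index) or, on a reachable cycle, loops forever; the strictly-forward-edge
-- shape (the tree adjacency this code is written for) is a checkable condition guaranteeing
-- termination, at the cost of also excluding some backward/negative-index edges on which A happens to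
-- terminate (see cites; B agrees with A there too).
def Pre_gen_level_list_from_adj_list (adj_list : List (Int × List Int)) : Prop :=
  adj_list ≠ [] ∧
  ((∀ hd ∈ adj_list.head?, hd.2 = ([] : List Int)) ∨
    ∀ i : Fin adj_list.length, ∀ c ∈ (adj_list[i]).2,
      ((i : Nat) : Int) < c ∧ c < (adj_list.length : Int))
instance (adj_list : List (Int × List Int)) : Decidable (Pre_gen_level_list_from_adj_list adj_list) := by
  unfold Pre_gen_level_list_from_adj_list; infer_instance

def pvWitness_gen_level_list_from_adj_list : (List (Int × List Int)) :=
  [(5, [1, 2]), (3, [2]), (0, [])]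

def Spec_gen_level_list_from_adj_list (adj_list : List (Int × List Int)) (out : List (List Int)) : Prop := out = gen_level_list_from_adj_list_alt adj_list
instance (adj_list : List (Int × List Int)) (out : List (List Int)) : Decidable (Spec_gen_level_list_from_adj_list adj_list out) := by unfold Spec_gen_level_list_from_adj_list; infer_instance

-- ===== CLAIM (what is proved, stated in full; the proofs are below) =====
def Claim_equal_gen_level_list_from_adj_list : Prop := ∀ (adj_list : List (Int × List Int)), Dom_gen_level_list_from_adj_list adj_list → Pre_gen_level_list_from_adj_list adj_list → Spec_gen_level_list_from_adj_list adj_list (gen_level_list_from_adj_list adj_list)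

-- ===== LEMMAS AND PROOFS =====

theorem pvA_next_gen (adj : List (Int × List Int)) (cur : List Int) : ∀ acc : List Int,
    cur.foldl (fun acc nd =>
      if (pvChilds adj nd).length ≠ 0 then
        (pvChilds adj nd).foldl (fun a c => a ++ [c]) acc
      else acc) acc = acc ++ cur.flatMap (pvChilds adj) := by
  induction cur with
  | nil => simp
  | cons x cs ih =>
    intro acc
    simp only [List.foldl_cons, List.flatMap_cons]
    by_cases h : (pvChilds adj x).length ≠ 0
    · rw [if_pos h, ih, PySem.List.foldl_append_singleton, List.append_assoc]
    · rw [if_neg h, ih]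
      simp only [ne_eq, Decidable.not_not, List.length_eq_zero_iff] at h
      simp [h]

-- the guarded double append loop of A is flatMap of the children lists
theorem pvA_next_eq (adj : List (Int × List Int)) (cur : List Int) :
    pvA_next adj cur = cur.flatMap (pvChilds adj) := by
  unfold pvA_next
  rw [pvA_next_gen adj cur [], List.nil_append]

-- writing into the last bucket
theorem pvModify_last (l0 : List (List Int)) (b : List Int) (f : List Int → List Int) :
    (l0 ++ [b]).modify l0.length f = l0 ++ [f b] := by
  induction l0 with
  | nil => simp
  | cons x xs ih =>
    simp only [List.cons_append, List.length_cons, List.modify_succ_cons, ih]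

-- every child list is bounded by pvMaxDeg
theorem pvChilds_len_le (adj : List (Int × List Int)) (x : Int) :
    (pvChilds adj x).length ≤ pvMaxDeg adj := by
  unfold pvChilds pvMaxDeg
  cases h : PySem.List.pyGet? adj x with
  | none => simp
  | some a =>
    have hm : a ∈ adj := PySem.List.mem_of_pyGet?_eq_some adj h
    have hmm : a.2.length ∈ adj.map (fun p => p.2.length) := List.mem_map_of_mem hm
    simpa [h] using (PySem.List.le_foldl_max (adj.map (fun p => p.2.length)) 0).2 _ hmm

theorem pvFlatMap_len_le (adj : List (Int × List Int)) (cur : List Int) :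
    (cur.flatMap (pvChilds adj)).length ≤ cur.length * pvMaxDeg adj := by
  induction cur with
  | nil => simp
  | cons x cs ih =>
    simp only [List.flatMap_cons, List.length_append, List.length_cons]
    calc (pvChilds adj x).length + (cs.flatMap (pvChilds adj)).length
        ≤ pvMaxDeg adj + cs.length * pvMaxDeg adj := Nat.add_le_add (pvChilds_len_le adj x) ih
      _ = (cs.length + 1) * pvMaxDeg adj := by ring

-- under Pre_, children of an in-range node are strictly larger and in range
theorem pvChilds_spec (adj : List (Int × List Int))
    (hFwd : ∀ i : Fin adj.length, ∀ c ∈ (adj[i]).2,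
      ((i : Nat) : Int) < c ∧ c < (adj.length : Int)) (x : Int)
    (h0 : 0 ≤ x) (hn : x < (adj.length : Int)) :
    ∀ c ∈ pvChilds adj x, x < c ∧ c < (adj.length : Int) := by
  intro c hc
  have hlt : x.toNat < adj.length := by omega
  have hx : PySem.List.pyGet? adj x = some adj[x.toNat] :=
    PySem.List.pyGet?_eq_some_getElem adj h0 hn
  have hc' : c ∈ (adj[(⟨x.toNat, hlt⟩ : Fin adj.length)]).2 := by
    simpa [pvChilds, hx] using hc
  have := hFwd ⟨x.toNat, hlt⟩ c hc'
  constructor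
  · have h1 : ((x.toNat : Int)) < c := by simpa using this.1
    omega
  · exact this.2

-- B consumes the remainder of the current level: pops go into the last bucket, children join the queue tail
theorem pvB_step (adj : List (Int × List Int)) (cur : List Int) :
    ∀ (pend : List Int) (l0 : List (List Int)) (b : List Int) (fuel : Nat),
    pvB_loop adj (fuel + cur.length)
      (cur.map (fun x => (x, l0.length)) ++ pend.map (fun x => (x, l0.length + 1)))
      (l0 ++ [b])
    = pvB_loop adj fuel
        ((pend ++ cur.flatMap (pvChilds adj)).map (fun x => (x, l0.length + 1)))
        (l0 ++ [b ++ cur]) := by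
  induction cur with
  | nil => simp
  | cons x cs ih =>
    intro pend l0 b fuel
    have harith : fuel + (x :: cs).length = (fuel + cs.length) + 1 := by simp; omega
    rw [harith]
    simp only [List.map_cons, List.cons_append]
    rw [show pvB_loop adj ((fuel + cs.length) + 1)
          ((x, l0.length) :: (cs.map (fun x => (x, l0.length)) ++ pend.map (fun x => (x, l0.length + 1))))
          (l0 ++ [b])
        = pvB_loop adj (fuel + cs.length)
          ((cs.map (fun x => (x, l0.length)) ++ pend.map (fun x => (x, l0.length + 1)))
            ++ (pvChilds adj x).map (fun c => (c, l0.length + 1)))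
          (((if l0.length = (l0 ++ [b]).length then (l0 ++ [b]) ++ [[]] else l0 ++ [b])).modify l0.length (fun bucket => bucket ++ [x]))
      from rfl]
    have hne : l0.length ≠ (l0 ++ [b]).length := by simp
    rw [if_neg hne, pvModify_last]
    have hq : (cs.map (fun x => (x, l0.length)) ++ pend.map (fun x => (x, l0.length + 1)))
            ++ (pvChilds adj x).map (fun c => (c, l0.length + 1))
        = cs.map (fun x => (x, l0.length)) ++ (pend ++ pvChilds adj x).map (fun x => (x, l0.length + 1)) := by
      simp [List.append_assoc]
    rw [hq, ih (pend ++ pvChilds adj x) l0 (b ++ [x]) fuel]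
    simp [List.append_assoc]

-- main simulation: A's level loop against B's queue loop
theorem pvLoop_eq (adj : List (Int × List Int))
    (hFwd : ∀ i : Fin adj.length, ∀ c ∈ (adj[i]).2,
      ((i : Nat) : Int) < c ∧ c < (adj.length : Int)) :
    ∀ (fA : Nat) (next : List Int) (l0 : List (List Int)) (b : List Int) (fB : Nat),
    (∀ x ∈ next, ((l0.length : Int) + 1) ≤ x ∧ x < (adj.length : Int)) →
    adj.length + 1 ≤ fA + (l0.length + 1) →
    next.length * (pvMaxDeg adj + 1) ^ (adj.length + 1 - (l0.length + 1)) ≤ fB →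
    pvA_while adj fA (l0 ++ [b]) next
      = pvB_loop adj fB (next.map (fun x => (x, l0.length + 1))) (l0 ++ [b]) := by
  intro fA
  induction fA with
  | zero =>
    intro next l0 b fB hGood hFA hFB
    have hnil : next = [] := by
      cases next with
      | nil => rfl
      | cons x cs =>
        exfalso
        have hx := hGood x (List.mem_cons_self)
        omega
    subst hnil
    cases fB <;> simp [pvA_while, pvB_loop]
  | succ f ih =>
    intro next l0 b fB hGood hFA hFB
    cases next with
    | nil => cases fB <;> simp [pvA_while, pvB_loop]
    | cons x cs =>
      have hx := hGood x (List.mem_cons_self)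
      have hdn : l0.length + 1 ≤ adj.length := by omega
      have hP1 : 1 ≤ (pvMaxDeg adj + 1) ^ (adj.length + 1 - (l0.length + 2)) :=
        Nat.one_le_pow _ _ (by omega)
      have hP1' : 1 ≤ (pvMaxDeg adj + 1) ^ (adj.length + 1 - (l0.length + 1)) :=
        Nat.one_le_pow _ _ (by omega)
      have hfb1 : cs.length + 1 ≤ fB := by
        calc cs.length + 1 = (x :: cs).length * 1 := by simp
          _ ≤ (x :: cs).length * (pvMaxDeg adj + 1) ^ (adj.length + 1 - (l0.length + 1)) :=
              Nat.mul_le_mul_left _ hP1'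
          _ ≤ fB := hFB
      obtain ⟨g, rfl⟩ : ∃ g, fB = g + 1 := ⟨fB - 1, by omega⟩
      -- A side: one iteration of the while loop
      have hA : pvA_while adj (f+1) (l0 ++ [b]) (x :: cs)
          = pvA_while adj f ((l0 ++ [b]) ++ [x :: cs]) (pvA_next adj (x :: cs)) := rfl
      -- B side: pop (x, d+1), open the new bucket, put x into it
      have hB1 : pvB_loop adj (g+1) ((x, l0.length + 1) :: cs.map (fun y => (y, l0.length + 1))) (l0 ++ [b])
          = pvB_loop adj g
              (cs.map (fun y => (y, l0.length + 1)) ++ (pvChilds adj x).map (fun c => (c, l0.length + 2)))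
              ((l0 ++ [b]) ++ [[x]]) := by
        have : (if l0.length + 1 = (l0 ++ [b]).length then (l0 ++ [b]) ++ [[]] else (l0 ++ [b]))
            = (l0 ++ [b]) ++ [[]] := by simp
        show pvB_loop adj g _ (((if l0.length + 1 = (l0 ++ [b]).length then (l0 ++ [b]) ++ [[]] else (l0 ++ [b]))).modify (l0.length + 1) (fun bucket => bucket ++ [x])) = _
        rw [this]
        have hm : ((l0 ++ [b]) ++ [[]]).modify (l0.length + 1) (fun bucket => bucket ++ [x])
            = (l0 ++ [b]) ++ [[x]] := by
          have := pvModify_last (l0 ++ [b]) [] (fun bucket => bucket ++ [x])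
          simpa using this
        rw [hm]
      -- B side: consume the rest of the level with pvB_step
      have hcs : cs.length ≤ g := by omega
      have hg : g = (g - cs.length) + cs.length := by omega
      have hB2 : pvB_loop adj g
              (cs.map (fun y => (y, l0.length + 1)) ++ (pvChilds adj x).map (fun c => (c, l0.length + 2)))
              ((l0 ++ [b]) ++ [[x]])
          = pvB_loop adj (g - cs.length)
              ((pvChilds adj x ++ cs.flatMap (pvChilds adj)).map (fun y => (y, l0.length + 2)))
              ((l0 ++ [b]) ++ [x :: cs]) := by
        have := pvB_step adj cs (pvChilds adj x) (l0 ++ [b]) [x] (g - cs.length)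
        simp only [List.length_append, List.length_cons, List.length_nil] at this
        rw [hg]
        simpa [List.append_assoc] using this
      -- the next level
      have hnext : pvA_next adj (x :: cs) = pvChilds adj x ++ cs.flatMap (pvChilds adj) := by
        rw [pvA_next_eq]; simp
      -- invariant for the next level
      have hGood' : ∀ y ∈ pvChilds adj x ++ cs.flatMap (pvChilds adj),
          (((l0 ++ [b]).length : Int) + 1) ≤ y ∧ y < (adj.length : Int) := by
        intro y hy
        have : ∃ z ∈ x :: cs, y ∈ pvChilds adj z := by
          rcases List.mem_append.1 hy with h | h
          · exact ⟨x, List.mem_cons_self, h⟩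
          · rcases List.mem_flatMap.1 h with ⟨z, hz, hyz⟩
            exact ⟨z, List.mem_cons_of_mem _ hz, hyz⟩
        rcases this with ⟨z, hz, hyz⟩
        have hzg := hGood z hz
        have hzc := pvChilds_spec adj hFwd z (by omega) hzg.2 y hyz
        simp only [List.length_append, List.length_cons, List.length_nil]
        constructor
        · push_cast; omega
        · exact hzc.2
      -- fuel for the recursive call
      have hlen' : (pvChilds adj x ++ cs.flatMap (pvChilds adj)).length ≤ (cs.length + 1) * pvMaxDeg adj := by
        have := pvFlatMap_len_le adj (x :: cs)
        simpa [List.flatMap_cons] using this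
      have hFB' : (pvChilds adj x ++ cs.flatMap (pvChilds adj)).length
            * (pvMaxDeg adj + 1) ^ (adj.length + 1 - ((l0 ++ [b]).length + 1)) ≤ g - cs.length := by
        have hidx : adj.length + 1 - (l0.length + 1) = (adj.length + 1 - (l0.length + 2)) + 1 := by omega
        have hidx2 : adj.length + 1 - ((l0 ++ [b]).length + 1) = adj.length + 1 - (l0.length + 2) := by
          have hl : (l0 ++ [b]).length = l0.length + 1 := by simp
          omega
        set P := (pvMaxDeg adj + 1) ^ (adj.length + 1 - (l0.length + 2)) with hP
        rw [hidx2]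
        have hFBexp : (cs.length + 1) * (P * (pvMaxDeg adj + 1)) ≤ g + 1 := by
          calc (cs.length + 1) * (P * (pvMaxDeg adj + 1))
              = (x :: cs).length * (pvMaxDeg adj + 1) ^ (adj.length + 1 - (l0.length + 1)) := by
                rw [hidx, pow_succ, ← hP]; simp
            _ ≤ g + 1 := hFB
        have h2 : (pvChilds adj x ++ cs.flatMap (pvChilds adj)).length * P + (cs.length + 1)
            ≤ (cs.length + 1) * pvMaxDeg adj * P + (cs.length + 1) * P := by
          refine Nat.add_le_add (Nat.mul_le_mul_right _ hlen') ?_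
          calc cs.length + 1 = (cs.length + 1) * 1 := by ring
            _ ≤ (cs.length + 1) * P := Nat.mul_le_mul_left _ hP1
        have h3 : (cs.length + 1) * pvMaxDeg adj * P + (cs.length + 1) * P
            = (cs.length + 1) * (P * (pvMaxDeg adj + 1)) := by ring
        have h4 : (pvChilds adj x ++ cs.flatMap (pvChilds adj)).length * P + (cs.length + 1) ≤ g + 1 :=
          le_trans (h3 ▸ h2) hFBexp
        generalize hQ : (pvChilds adj x ++ cs.flatMap (pvChilds adj)).length * P = Q at h4 ⊢
        omega
      have hFA' : adj.length + 1 ≤ f + ((l0 ++ [b]).length + 1) := by simp; omega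
      have hrec := ih (pvChilds adj x ++ cs.flatMap (pvChilds adj)) (l0 ++ [b]) (x :: cs)
        (g - cs.length) hGood' hFA' hFB'
      calc pvA_while adj (f+1) (l0 ++ [b]) (x :: cs)
          = pvA_while adj f ((l0 ++ [b]) ++ [x :: cs]) (pvA_next adj (x :: cs)) := hA
        _ = pvA_while adj f ((l0 ++ [b]) ++ [x :: cs]) (pvChilds adj x ++ cs.flatMap (pvChilds adj)) := by rw [hnext]
        _ = pvB_loop adj (g - cs.length)
              ((pvChilds adj x ++ cs.flatMap (pvChilds adj)).map (fun y => (y, (l0 ++ [b]).length + 1)))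
              ((l0 ++ [b]) ++ [x :: cs]) := hrec
        _ = pvB_loop adj (g - cs.length)
              ((pvChilds adj x ++ cs.flatMap (pvChilds adj)).map (fun y => (y, l0.length + 2)))
              ((l0 ++ [b]) ++ [x :: cs]) := by simp
        _ = pvB_loop adj g
              (cs.map (fun y => (y, l0.length + 1)) ++ (pvChilds adj x).map (fun c => (c, l0.length + 2)))
              ((l0 ++ [b]) ++ [[x]]) := (hB2).symm
        _ = pvB_loop adj (g+1) ((x, l0.length + 1) :: cs.map (fun y => (y, l0.length + 1))) (l0 ++ [b]) := hB1.symm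
        _ = pvB_loop adj (g+1) ((x :: cs).map (fun y => (y, l0.length + 1))) (l0 ++ [b]) := by simp

theorem pvFinal_fwd (adj : List (Int × List Int)) (hne : adj ≠ [])
    (hFwd : ∀ i : Fin adj.length, ∀ c ∈ (adj[i]).2,
      ((i : Nat) : Int) < c ∧ c < (adj.length : Int)) :
    gen_level_list_from_adj_list adj = gen_level_list_from_adj_list_alt adj := by
  have hn1 : 1 ≤ adj.length := List.length_pos_iff.2 hne
  have h0 : (if (pvChilds adj 0).length ≠ 0 then
      (pvChilds adj 0).foldl (fun a c => a ++ [c]) [] else []) = pvChilds adj 0 := by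
    by_cases h : (pvChilds adj 0).length ≠ 0
    · rw [if_pos h, PySem.List.foldl_append_singleton, List.nil_append]
    · simp only [ne_eq, Decidable.not_not, List.length_eq_zero_iff] at h
      simp [h]
  have hA : gen_level_list_from_adj_list adj = pvA_while adj adj.length ([] ++ [[0]]) (pvChilds adj 0) := by
    unfold gen_level_list_from_adj_list
    rw [h0]
  have hP1 : 1 ≤ (pvMaxDeg adj + 1) ^ adj.length := Nat.one_le_pow _ _ (by omega)
  obtain ⟨g, hg⟩ : ∃ g, pvB_fuel adj = g + 1 := by
    refine ⟨pvB_fuel adj - 1, ?_⟩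
    have : 1 ≤ pvB_fuel adj := Nat.one_le_pow _ _ (by omega)
    omega
  have hB : gen_level_list_from_adj_list_alt adj = pvB_loop adj g ((pvChilds adj 0).map (fun c => (c, 1))) [[0]] := by
    unfold gen_level_list_from_adj_list_alt
    rw [hg]
    show pvB_loop adj g ([] ++ (pvChilds adj 0).map (fun c => (c, 0 + 1)))
        (((if 0 = ([] : List (List Int)).length then ([] : List (List Int)) ++ [[]] else [])).modify 0
          (fun bucket => bucket ++ [(0:Int)])) = _
    norm_num
  have hGood : ∀ x ∈ pvChilds adj 0, ((([] : List (List Int)).length : Int) + 1) ≤ x ∧ x < (adj.length : Int) := by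
    intro x hx
    have := pvChilds_spec adj hFwd 0 (le_refl 0) (by exact_mod_cast hn1) x hx
    simp only [List.length_nil, Nat.cast_zero, zero_add]
    omega
  have hFB : (pvChilds adj 0).length * (pvMaxDeg adj + 1) ^ (adj.length + 1 - (([] : List (List Int)).length + 1)) ≤ g := by
    simp only [List.length_nil, zero_add, Nat.add_sub_cancel]
    have hlen := pvChilds_len_le adj 0
    have hmul : (pvChilds adj 0).length * (pvMaxDeg adj + 1) ^ adj.length
        ≤ pvMaxDeg adj * (pvMaxDeg adj + 1) ^ adj.length := Nat.mul_le_mul_right _ hlen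
    have hfe : pvB_fuel adj = pvMaxDeg adj * (pvMaxDeg adj + 1) ^ adj.length + (pvMaxDeg adj + 1) ^ adj.length := by
      unfold pvB_fuel
      rw [pow_succ]
      ring
    generalize hQ : (pvChilds adj 0).length * (pvMaxDeg adj + 1) ^ adj.length = Q at hmul ⊢
    generalize hR : pvMaxDeg adj * (pvMaxDeg adj + 1) ^ adj.length = R at hmul hfe
    generalize hPp : (pvMaxDeg adj + 1) ^ adj.length = P at hfe hP1
    omega
  have hmain := pvLoop_eq adj hFwd adj.length (pvChilds adj 0) [] [0] g hGood (by omega) hFB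
  rw [hA, hB]
  simpa using hmain

-- when node 0 has no children both programs stop at [[0]] at once
theorem pvFinal_root (adj : List (Int × List Int)) (hne : adj ≠ [])
    (hroot : ∀ hd ∈ adj.head?, hd.2 = ([] : List Int)) :
    gen_level_list_from_adj_list adj = gen_level_list_from_adj_list_alt adj := by
  obtain ⟨a, t, rfl⟩ : ∃ a t, adj = a :: t := by
    cases adj with
    | nil => exact absurd rfl hne
    | cons a t => exact ⟨a, t, rfl⟩
  have ha : a.2 = [] := hroot a rfl
  have hc0 : pvChilds (a :: t) 0 = [] := by
    simp [pvChilds, ha]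
  have hA : gen_level_list_from_adj_list (a :: t) = [[0]] := by
    unfold gen_level_list_from_adj_list
    rw [hc0]
    simp [pvA_while]
  have hB : gen_level_list_from_adj_list_alt (a :: t) = [[0]] := by
    unfold gen_level_list_from_adj_list_alt
    obtain ⟨g, hg⟩ : ∃ g, pvB_fuel (a :: t) = g + 1 := by
      refine ⟨pvB_fuel (a :: t) - 1, ?_⟩
      have : 1 ≤ pvB_fuel (a :: t) := Nat.one_le_pow _ _ (by omega)
      omega
    rw [hg]
    show pvB_loop (a :: t) g ([] ++ (pvChilds (a :: t) 0).map (fun c => (c, 0 + 1)))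
        (((if 0 = ([] : List (List Int)).length then ([] : List (List Int)) ++ [[]] else [])).modify 0
          (fun bucket => bucket ++ [(0:Int)])) = [[0]]
    rw [hc0]
    cases g <;> simp [pvB_loop]
  rw [hA, hB]

theorem pvFinal (adj : List (Int × List Int)) (hPre : Pre_gen_level_list_from_adj_list adj) :
    gen_level_list_from_adj_list adj = gen_level_list_from_adj_list_alt adj := by
  rcases hPre with ⟨hne, hroot | hFwd⟩
  · exact pvFinal_root adj hne hroot
  · exact pvFinal_fwd adj hne hFwd

-- ===== VERDICT (by name: the statement is the Claim_ definition above) =====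
theorem gen_level_list_from_adj_list_spec : Claim_equal_gen_level_list_from_adj_list := by
  intro adj_list _hDom hPre
  unfold Spec_gen_level_list_from_adj_list
  exact pvFinal adj_list hPre
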